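-- pv_equiv track=rewrite | github.com/isaksengeir/gaussian_wrapper | src/linda_distribute.py | linda_distribute_ordered
-- ===== SOURCE A (Python) =====
-- def linda_distribute_ordered(lindas, cpus):
--     """
--     :param lindas:
--     :param cpus:
--     :return: array with cpus ordered
--     """
--     cpu_array = [list() for i in range(lindas)]
--     l_ = 0
--     group_size = int(cpus/lindas)
--     remain = cpus % lindas
--
--     for i in range(cpus):
--         if len(cpu_array[l_]) >= group_size:
--             if remain > 0 and len(cpu_array[l_]) == group_size:
--                 remain -= 1
--             else:
--                 l_ += 1
--
--         cpu_array[l_].append(i)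
--
--     return cpu_array
-- ===== SOURCE B (Python) =====
-- def linda_distribute_ordered(lindas, cpus):
--     group_size = int(cpus / lindas)
--     remain = cpus % lindas
--     ids = list(range(cpus))
--     groups = []
--     start = 0
--     for g in range(lindas):
--         size = group_size + (1 if g < remain else 0)
--         groups.append(ids[start:start + size])
--         start += size
--     return groups
-- ===== Notes on version B (the rewrite author's own statement) =====
-- stated objective: simpler
-- what changed: B computes each group's size arithmetically (group_size plus one extra for the first `remain` groups) and emits contiguous slices of list(range(cpus)) while advancing a running start cursor, instead of A's per-cpu loop that appends one index at a time with length-threshold and remain-decrement branching.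
import Mathlib
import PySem

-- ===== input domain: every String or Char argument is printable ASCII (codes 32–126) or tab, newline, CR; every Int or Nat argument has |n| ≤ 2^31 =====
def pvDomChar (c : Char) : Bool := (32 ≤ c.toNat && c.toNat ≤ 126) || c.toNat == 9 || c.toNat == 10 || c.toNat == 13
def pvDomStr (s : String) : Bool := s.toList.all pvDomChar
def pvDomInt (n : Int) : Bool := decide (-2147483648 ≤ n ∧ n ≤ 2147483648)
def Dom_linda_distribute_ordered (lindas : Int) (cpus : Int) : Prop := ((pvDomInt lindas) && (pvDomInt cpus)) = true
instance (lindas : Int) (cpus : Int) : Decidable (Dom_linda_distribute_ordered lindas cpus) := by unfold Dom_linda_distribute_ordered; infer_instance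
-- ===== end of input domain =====

-- B replaces A's per-cpu loop (append one index at a time, with length-threshold and
-- remain-decrement branching) by computing each group's size arithmetically and slicing
-- contiguous pieces out of list(range(cpus)).  Objective: simpler.

-- ===== PORT A =====
-- loop body of 'for i in range(cpus)': state = (cpu_array, l_, remain)
def pvStepA (gs : Int) (st : List (List Int) × Int × Int) (i : Int) : List (List Int) × Int × Int :=
  match PySem.List.pyGet? st.1 st.2.1 with
  | none => st  -- IndexError in Python; unreachable under Pre_
  | some g =>
    if gs ≤ (g.length : Int) then
      if 0 < st.2.2 ∧ (g.length : Int) = gs then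
        (PySem.List.pySetD st.1 st.2.1 (g ++ [i]), st.2.1, st.2.2 - 1)
      else
        match PySem.List.pyGet? st.1 (st.2.1 + 1) with
        | none => st  -- IndexError in Python; unreachable under Pre_
        | some g' => (PySem.List.pySetD st.1 (st.2.1 + 1) (g' ++ [i]), st.2.1 + 1, st.2.2)
    else
      (PySem.List.pySetD st.1 st.2.1 (g ++ [i]), st.2.1, st.2.2)

def linda_distribute_ordered (lindas : Int) (cpus : Int) : List (List Int) :=
  let cpu_array : List (List Int) := (PySem.List.pyRange 0 lindas 1).map (fun _ => [])
  -- int(cpus/lindas): float division is exact for |cpus|,|lindas| ≤ 2^31 (quotient cannot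
  -- round across an integer), and int() truncates toward zero: Int.tdiv is exact on Dom.
  let group_size : Int := cpus.tdiv lindas
  let remain : Int := PySem.Int.mod cpus lindas
  ((PySem.List.pyRange 0 cpus 1).foldl (pvStepA group_size) (cpu_array, 0, remain)).1

-- ===== PORT B =====
-- loop body of 'for g in range(lindas)': state = (groups, start)
def pvStepB (ids : List Int) (gs rem : Int) (st : List (List Int) × Int) (g : Int) :
    List (List Int) × Int :=
  let size := gs + (if g < rem then 1 else 0)
  (st.1 ++ [PySem.List.slice ids (some st.2) (some (st.2 + size))], st.2 + size)

def linda_distribute_ordered_alt (lindas : Int) (cpus : Int) : List (List Int) :=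
  let group_size : Int := cpus.tdiv lindas   -- int(cpus/lindas), exact on Dom as above
  let remain : Int := PySem.Int.mod cpus lindas
  let ids : List Int := PySem.List.pyRange 0 cpus 1
  ((PySem.List.pyRange 0 lindas 1).foldl (pvStepB ids group_size remain) ([], 0)).1

-- ===== PRECONDITION & SPEC =====
-- Pre_ excludes exactly the inputs where A raises: lindas = 0 (ZeroDivisionError) and
-- lindas < 0 with cpus > 0 (IndexError: the group array is empty but the cpu loop indexes it).
def Pre_linda_distribute_ordered (lindas : Int) (cpus : Int) : Prop :=
  lindas ≠ 0 ∧ (0 < lindas ∨ cpus ≤ 0)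
instance (lindas : Int) (cpus : Int) : Decidable (Pre_linda_distribute_ordered lindas cpus) := by
  unfold Pre_linda_distribute_ordered; infer_instance

def pvWitness_linda_distribute_ordered : Int × Int := (3, 7)

def Spec_linda_distribute_ordered (lindas : Int) (cpus : Int) (out : List (List Int)) : Prop :=
  out = linda_distribute_ordered_alt lindas cpus
instance (lindas : Int) (cpus : Int) (out : List (List Int)) :
    Decidable (Spec_linda_distribute_ordered lindas cpus out) := by
  unfold Spec_linda_distribute_ordered; infer_instance

-- ===== CLAIM (what is proved, stated in full; the proofs are below) =====
def Claim_equal_linda_distribute_ordered : Prop :=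
  ∀ (lindas : Int) (cpus : Int), Dom_linda_distribute_ordered lindas cpus →
    Pre_linda_distribute_ordered lindas cpus →
    Spec_linda_distribute_ordered lindas cpus (linda_distribute_ordered lindas cpus)

-- ===== LEMMAS AND PROOFS =====

def pvBuild (gs start r : Int) (k : Nat) : List (List Int) × Int :=
  match k with
  | 0 => ([], start)
  | Nat.succ k =>
    let s := gs + (if 0 < r then 1 else 0)
    let p := pvBuild gs (start + s) (r - 1) k
    (PySem.List.pyRange start (start + s) 1 :: p.1, p.2)

theorem pvBuild_nonpos (k : Nat) : ∀ (gs start r r' : Int), r ≤ 0 → r' ≤ 0 →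
    pvBuild gs start r k = pvBuild gs start r' k := by
  induction k with
  | zero => intro gs start r r' _ _; rfl
  | succ k ih =>
    intro gs start r r' hr hr'
    simp only [pvBuild, if_neg (by omega : ¬ 0 < r), if_neg (by omega : ¬ 0 < r')]
    rw [ih gs (start + (gs + 0)) (r - 1) (r' - 1) (by omega) (by omega)]

theorem pvBNil (gs rem : Int) (xs : List Int) : ∀ (acc : List (List Int)) (start : Int),
    (xs.foldl (pvStepB [] gs rem) (acc, start)).1 = acc ++ List.replicate xs.length [] := by
  induction xs with
  | nil => intro acc start; simp
  | cons x t ih =>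
    intro acc start
    simp only [List.foldl_cons, pvStepB]
    rw [ih]
    simp [PySem.List.slice, List.replicate_succ]

theorem pvBuild_gs0 (k : Nat) : ∀ (start r : Int), 0 ≤ r →
    (pvBuild 0 start r k).1 = (PySem.List.pyRange start (start + min r k) 1).map (fun j => [j])
      ++ List.replicate (k - r.toNat) [] := by
  induction k with
  | zero =>
    intro start r hr
    simp [pvBuild]
  | succ k ih =>
    intro start r hr
    by_cases h : 0 < r
    · simp only [pvBuild, if_pos h]
      rw [ih (start + (0 + 1)) (r - 1) (by omega)]
      rw [PySem.List.pyRange_one_cons (by push_cast; omega : start < start + min r ((k+1 : Nat) : Int))]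
      rw [show start + (0 + 1) + min (r - 1) (k : Int) = start + min r ((k+1 : Nat):Int) by push_cast; omega]
      rw [show start + (0 + 1) = start + 1 by omega]
      simp only [List.map_cons]
      rw [show (k + 1) - r.toNat = k - (r-1).toNat by omega]
      simp [PySem.List.pyRange_one_singleton]
    · have hr0 : r = 0 := by omega
      subst hr0
      simp only [pvBuild, if_neg h]
      rw [pvBuild_nonpos k 0 (start + (0+0)) (0 - 1) 0 (by omega) (by omega)]
      rw [ih (start + (0 + 0)) 0 (by omega)]
      simp [PySem.List.pyRange_one_eq_nil, List.replicate_succ]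

theorem pvInit (L : Int) :
    (PySem.List.pyRange 0 L 1).map (fun _ => ([] : List Int)) = List.replicate L.toNat [] := by
  rw [PySem.List.pyRange_one]
  rw [List.map_map]
  rw [show ((fun _ => ([]:List Int)) ∘ fun k : Nat => ((0:Int) + k)) = Function.const Nat ([]:List Int) from rfl]
  rw [List.map_const, List.length_range]
  simp

theorem pvSliceRange (n a b : Int) (h0 : 0 ≤ a) (hab : a ≤ b) (hbn : b ≤ n) :
    PySem.List.slice (PySem.List.pyRange 0 n 1) (some a) (some b) = PySem.List.pyRange a b 1 := by
  rw [PySem.List.slice_toNat _ h0 (by omega)]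
  apply List.ext_getElem
  · simp [PySem.List.length_pyRange_one]; omega
  · intro i h1 h2
    simp only [List.getElem_take, List.getElem_drop]
    rw [PySem.List.getElem_pyRange_one, PySem.List.getElem_pyRange_one]
    omega

theorem pvBLoop (gs rem n : Int) (hgs : 0 ≤ gs) (k : Nat) : ∀ (g start : Int) (acc : List (List Int)),
    0 ≤ start → start + (gs * k + min (max (rem - g) 0) (k : Int)) ≤ n →
    (PySem.List.pyRange g (g + k) 1).foldl (pvStepB (PySem.List.pyRange 0 n 1) gs rem) (acc, start)
      = (acc ++ (pvBuild gs start (rem - g) k).1, (pvBuild gs start (rem - g) k).2) := by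
  induction k with
  | zero =>
    intro g start acc h0 hb
    simp [pvBuild]
  | succ k ih =>
    intro g start acc h0 hb
    rw [PySem.List.pyRange_one_cons (by push_cast; omega : g < g + ((k+1 : Nat):Int))]
    simp only [List.foldl_cons]
    have hite : (if g < rem then (1:Int) else 0) = (if 0 < rem - g then 1 else 0) := by
      by_cases h : g < rem
      · rw [if_pos h, if_pos (by omega)]
      · rw [if_neg h, if_neg (by omega)]
    push_cast at hb
    rw [show gs * ((k:Int)+1) = gs * (k:Int) + gs from by ring] at hb
    have hnn : 0 ≤ gs * (k:Int) := mul_nonneg hgs (by positivity)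
    have hsz : 0 ≤ gs + (if 0 < rem - g then (1:Int) else 0) := by
      by_cases h : 0 < rem - g
      · rw [if_pos h]; omega
      · rw [if_neg h]; omega
    have hfit : start + (gs + (if 0 < rem - g then (1:Int) else 0)) ≤ n := by
      by_cases h : 0 < rem - g
      · rw [if_pos h]; omega
      · rw [if_neg h]; omega
    simp only [pvStepB, hite]
    rw [pvSliceRange n start (start + (gs + (if 0 < rem - g then (1:Int) else 0))) h0 (by omega) hfit]
    rw [show g + ((k+1:Nat):Int) = (g + 1) + (k:Int) by push_cast; omega]
    rw [ih (g+1) (start + (gs + (if 0 < rem - g then (1:Int) else 0))) _ (by omega)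
        (by by_cases h : 0 < rem - g
            · rw [if_pos h]; omega
            · rw [if_neg h]; omega)]
    simp only [pvBuild]
    rw [show rem - (g + 1) = rem - g - 1 by omega]
    simp

theorem pvSet_mid {α : Type} (pre : List α) (x v : α) (rest : List α) :
    (pre ++ x :: rest).set pre.length v = pre ++ v :: rest := by
  induction pre with
  | nil => rfl
  | cons a t ih => simp [ih]

-- evaluate one step that appends to the current (middle) group, plain branch
theorem pvStepA_mid (gs : Int) (pre : List (List Int)) (cur : List Int) (rest : List (List Int))
    (r i : Int) (h : gs ≤ (cur.length : Int) → (0 < r ∧ (cur.length : Int) = gs)) :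
    pvStepA gs (pre ++ cur :: rest, (pre.length : Int), r) i
      = (pre ++ (cur ++ [i]) :: rest, (pre.length : Int),
         if gs ≤ (cur.length : Int) then r - 1 else r) := by
  simp only [pvStepA, PySem.List.pyGet?_append_length]
  by_cases hc : gs ≤ (cur.length : Int)
  · rw [if_pos hc, if_pos (h hc)]
    simp [PySem.List.pySetD_natCast, pvSet_mid, hc]
  · rw [if_neg hc]
    simp [PySem.List.pySetD_natCast, pvSet_mid, hc]

-- evaluate one step that advances l_ to the next (empty) group
theorem pvStepA_adv (gs : Int) (pre : List (List Int)) (cur nxt : List Int) (rest : List (List Int))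
    (r i : Int) (hlen : gs ≤ (cur.length : Int)) (hno : ¬ (0 < r ∧ (cur.length : Int) = gs)) :
    pvStepA gs (pre ++ cur :: nxt :: rest, (pre.length : Int), r) i
      = ((pre ++ [cur]) ++ (nxt ++ [i]) :: rest, ((pre ++ [cur]).length : Int), r) := by
  have he : pre ++ cur :: nxt :: rest = (pre ++ [cur]) ++ nxt :: rest := by simp
  have hi : (pre.length : Int) + 1 = (((pre ++ [cur]).length : Nat) : Int) := by simp
  simp only [pvStepA, PySem.List.pyGet?_append_length]
  rw [if_pos hlen, if_neg hno, he, hi, PySem.List.pyGet?_append_length]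
  simp only [PySem.List.pySetD_natCast, pvSet_mid]

theorem pvFinish (gs : Int) (hgs : 1 ≤ gs) (d : Nat) : ∀ (c r start : Int) (pre : List (List Int)) (k : Nat),
    1 ≤ c → c ≤ gs → c + d = gs + (if 0 < r then 1 else 0) →
    (PySem.List.pyRange start (start + d) 1).foldl (pvStepA gs)
      (pre ++ PySem.List.pyRange (start - c) start 1 :: List.replicate k ([] : List Int), (pre.length : Int), r)
      = (pre ++ PySem.List.pyRange (start - c) (start + d) 1 :: List.replicate k ([] : List Int),
         (pre.length : Int), r - (if 0 < r then 1 else 0)) := by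
  induction d with
  | zero =>
    intro c r start pre k h1 h2 h3
    have he : (if 0 < r then (1:Int) else 0) = 0 := by
      by_cases h : 0 < r
      · rw [if_pos h] at h3 ⊢; omega
      · rw [if_neg h]
    rw [he] at h3 ⊢
    simp [PySem.List.pyRange_one_eq_nil (by push_cast; omega : start + ((0:Nat):Int) ≤ start)]
  | succ d ih =>
    intro c r start pre k h1 h2 h3
    have hlen : ((PySem.List.pyRange (start - c) start 1).length : Int) = c := by
      rw [PySem.List.length_pyRange_one]; omega
    rw [PySem.List.pyRange_one_cons (by push_cast; omega : start < start + ((d+1:Nat):Int))]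
    simp only [List.foldl_cons]
    by_cases hc : c < gs
    · -- plain append, stay in group
      rw [pvStepA_mid gs pre _ _ r start (by rw [hlen]; omega)]
      rw [if_neg (by rw [hlen]; omega)]
      rw [show PySem.List.pyRange (start - c) start 1 ++ [start]
            = PySem.List.pyRange ((start + 1) - (c + 1)) (start + 1) 1 from by
        rw [show (start + 1) - (c + 1) = start - c by omega,
            PySem.List.pyRange_one_succ_right (by omega : start - c ≤ start)]]
      rw [show start + ((d+1:Nat):Int) = (start + 1) + ((d:Nat):Int) by push_cast; omega]
      rw [ih (c+1) r (start+1) pre k (by omega) (by omega)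
          (by by_cases h : 0 < r
              · rw [if_pos h] at h3 ⊢; push_cast at h3 ⊢; omega
              · rw [if_neg h] at h3 ⊢; push_cast at h3 ⊢; omega)]
      rw [show (start + 1) - (c + 1) = start - c by omega]
    · -- c = gs: the remain-decrement step, then d = 0
      have hceq : c = gs := by omega
      have hr : 0 < r := by
        by_cases h : 0 < r
        · exact h
        · rw [if_neg h] at h3; omega
      have hd0' : d = 0 := by
        rw [if_pos hr] at h3; omega
      subst hd0'
      rw [pvStepA_mid gs pre _ _ r start (fun _ => ⟨hr, by omega⟩)]
      rw [hlen, if_pos (by omega : gs ≤ c)]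
      rw [PySem.List.pyRange_one_eq_nil (by push_cast; omega : start + ((0+1:Nat):Int) ≤ start + 1)]
      simp only [List.foldl_nil]
      rw [if_pos hr]
      rw [show start + ((0+1:Nat):Int) = start + 1 by push_cast; omega]
      rw [show PySem.List.pyRange (start - c) start 1 ++ [start]
            = PySem.List.pyRange (start - c) (start + 1) 1 from
        (PySem.List.pyRange_one_succ_right (by omega : start - c ≤ start)).symm]

theorem pvZero (m : Nat) : ∀ (pre : List (List Int)) (prev : List Int) (k : Nat) (r start : Int),
    1 ≤ (prev.length : Int) → m ≤ k →
    (PySem.List.pyRange start (start + m) 1).foldl (pvStepA 0)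
      (pre ++ prev :: List.replicate k ([] : List Int), (pre.length : Int), r)
      = (pre ++ prev :: ((PySem.List.pyRange start (start + m) 1).map (fun j => [j])
          ++ List.replicate (k - m) ([] : List Int)), (pre.length : Int) + m, r) := by
  induction m with
  | zero =>
    intro pre prev k r start h1 h2
    rw [PySem.List.pyRange_one_eq_nil (by push_cast; omega : start + ((0:Nat):Int) ≤ start)]
    simp
  | succ m ih =>
    intro pre prev k r start h1 h2
    obtain ⟨k', rfl⟩ : ∃ k', k = k' + 1 := ⟨k - 1, by omega⟩
    rw [PySem.List.pyRange_one_cons (by push_cast; omega : start < start + ((m+1:Nat):Int))]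
    simp only [List.foldl_cons, List.replicate_succ]
    rw [pvStepA_adv 0 pre prev [] (List.replicate k' []) r start (by omega)
        (by intro ⟨_, hh⟩; omega)]
    simp only [List.nil_append]
    rw [show start + ((m+1:Nat):Int) = (start + 1) + ((m:Nat):Int) by push_cast; omega]
    rw [ih (pre ++ [prev]) [start] k' r (start + 1) (by simp) (by omega)]
    rw [show k' + 1 - (m + 1) = k' - m from by omega]
    simp only [Prod.mk.injEq]
    refine ⟨?_, ?_⟩
    · simp [List.append_assoc]
    · simp; push_cast; ring_nf

theorem pvGroups (gs : Int) (hgs : 1 ≤ gs) (k : Nat) : ∀ (pre : List (List Int)) (prev : List Int) (r start : Int),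
    0 ≤ r → r ≤ (k : Int) → gs ≤ (prev.length : Int) → (0 < r → (prev.length : Int) = gs + 1) →
    (PySem.List.pyRange start (start + (gs * k + min r (k : Int))) 1).foldl (pvStepA gs)
      (pre ++ prev :: List.replicate k ([] : List Int), (pre.length : Int), r)
      = (pre ++ prev :: (pvBuild gs start r k).1, (pre.length : Int) + k, 0) := by
  induction k with
  | zero =>
    intro pre prev r start h0 h1 h2 h3
    have hr0 : r = 0 := by push_cast at h1; omega
    subst hr0
    rw [PySem.List.pyRange_one_eq_nil (by push_cast; omega : start + (gs * ((0:Nat):Int) + min 0 ((0:Nat):Int)) ≤ start)]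
    simp [pvBuild]
  | succ k ih =>
    intro pre prev r start h0 h1 h2 h3
    -- the size of the next group
    set e : Int := if 0 < r then 1 else 0 with he
    have he01 : e = 0 ∨ e = 1 := by
      by_cases h : 0 < r <;> simp [he, h]
    have her : (0 < r → e = 1) ∧ (r ≤ 0 → e = 0) := by
      constructor <;> intro h <;> simp [he, h] <;> omega
    have hT : start + (gs * ((k+1:Nat):Int) + min r ((k+1:Nat):Int))
        = (start + (gs + e)) + (gs * (k:Nat) + min (r - e) ((k:Nat):Int)) := by
      push_cast
      rw [show gs * ((k:Int)+1) = gs * (k:Int) + gs from by ring]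
      rcases he01 with h | h <;> rw [h] <;> push_cast at h1 <;> omega
    rw [hT]
    rw [PySem.List.pyRange_one_append start (start + (gs + e)) _
        (by omega) (by have : 0 ≤ gs * ((k:Nat):Int) := mul_nonneg (by omega) (by positivity); push_cast; omega)]
    rw [List.foldl_append]
    -- the boundary step: advance l_ and place the first element of the new group
    rw [PySem.List.pyRange_one_cons (by omega : start < start + (gs + e))]
    simp only [List.foldl_cons, List.replicate_succ]
    rw [pvStepA_adv gs pre prev [] (List.replicate k []) r start h2
        (by intro ⟨hh1, hh2⟩; have := h3 hh1; omega)]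
    simp only [List.nil_append]
    -- fill the rest of the new group
    have hfin := pvFinish gs hgs (gs + e - 1).toNat 1 r (start + 1) (pre ++ [prev]) k
        (by omega) (by omega)
        (by rcases he01 with h | h <;> rw [h] at he ⊢ <;> push_cast <;> omega)
    rw [show PySem.List.pyRange ((start + 1) - 1) (start + 1) 1 = [start] from by
      rw [show (start + 1) - 1 = start by omega]; exact PySem.List.pyRange_one_singleton start] at hfin
    rw [show (start + 1) + ((gs + e - 1).toNat : Int) = start + (gs + e) from by
      rcases he01 with h | h <;> rw [h] <;> omega] at hfin
    rw [show ((start + 1) - 1) = start from by omega] at hfin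
    rw [hfin]
    rw [← he]
    rw [show (((pre ++ [prev]).length : Nat) : Int) = (pre.length : Int) + 1 from by simp]
    -- recurse over the remaining k groups
    have hrec := ih (pre ++ [prev]) (PySem.List.pyRange start (start + (gs + e)) 1) (r - e)
        (start + (gs + e))
        (by rcases he01 with h | h <;> rw [h] <;> omega)
        (by rcases he01 with h | h <;> rw [h] <;> push_cast at h1 ⊢ <;> omega)
        (by rw [PySem.List.length_pyRange_one]; omega)
        (by intro hh
            have hre : e = 1 := by
              rcases he01 with h | h
              · exfalso; rcases her with ⟨_, h2'⟩; rw [he] at h; omega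
              · exact h
            rw [PySem.List.length_pyRange_one]
            rw [hre] at hh ⊢
            omega)
    rw [show ((pre ++ [prev]).length : Int) = (pre.length : Int) + 1 from by simp] at hrec
    rw [hrec]
    -- assemble
    simp only [Prod.mk.injEq]
    refine ⟨?_, ?_⟩
    · simp only [List.append_assoc, List.cons_append, List.nil_append]
      congr 2
      simp only [pvBuild, ← he]
      rcases he01 with h | h
      · rw [h]
        rw [pvBuild_nonpos k gs (start + (gs + 0)) (r - 1) (r - 0) (by rw [he] at h; omega) (by rw [he] at h; omega)]
      · rw [h]
    · exact ⟨by push_cast; ring, trivial⟩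

theorem pvMain (l c : Int) (hl : l ≠ 0) (hlc : 0 < l ∨ c ≤ 0) :
    linda_distribute_ordered l c = linda_distribute_ordered_alt l c := by
  simp only [linda_distribute_ordered, linda_distribute_ordered_alt]
  by_cases hc : c ≤ 0
  · -- no cpus: both sides are lindas empty groups
    rw [PySem.List.pyRange_one_eq_nil (by omega : c ≤ (0:Int))]
    simp only [List.foldl_nil]
    rw [pvBNil]
    rw [pvInit, PySem.List.length_pyRange_one]
    simp
  · -- 0 < c, hence 0 < l
    have hl0 : 0 < l := by rcases hlc with h | h; exact h; omega
    have hc0 : 0 < c := by omega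
    rw [Int.tdiv_eq_ediv_of_nonneg (by omega : (0:Int) ≤ c)]
    rw [PySem.Int.mod_eq_emod_of_pos (by omega : (0:Int) < l)]
    have hkey : l * (c / l) + c % l = c := by have := Int.emod_add_ediv c l; omega
    have h0rem : 0 ≤ c % l := Int.emod_nonneg c (by omega)
    have hreml : c % l < l := Int.emod_lt_of_pos c (by omega)
    have hgs0 : 0 ≤ c / l := Int.ediv_nonneg (by omega) (by omega)
    obtain ⟨k, hk⟩ : ∃ k, l.toNat = k + 1 := ⟨l.toNat - 1, by omega⟩
    have hkl : ((k + 1 : Nat) : Int) = l := by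
      have := Int.toNat_of_nonneg (le_of_lt hl0)
      rw [hk] at this; exact_mod_cast this
    set gs := c / l with hgs
    set rem := c % l with hrem
    by_cases hgs1 : 1 ≤ gs
    · -- gs ≥ 1
      set e0 : Int := if 0 < rem then 1 else 0 with he0
      have he01 : e0 = 0 ∨ e0 = 1 := by by_cases h : 0 < rem <;> simp [he0, h]
      have her0 : e0 = 0 → rem = 0 := by
        intro h; by_cases hh : 0 < rem
        · rw [he0, if_pos hh] at h; omega
        · omega
      have hgl : gs ≤ gs * l := le_mul_of_one_le_right hgs0 (by omega)
      have hlgs : gs * l + rem = c := by rw [mul_comm]; omega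
      have hs0c : gs + e0 ≤ c := by rcases he01 with h | h <;> rw [h] <;> omega
      have hms : gs * ((k:Nat):Int) + gs = gs * l := by rw [← hkl]; push_cast; ring
      -- B side: pvBLoop
      have hB : (List.foldl (pvStepB (PySem.List.pyRange 0 c 1) gs rem) ([], 0)
            (PySem.List.pyRange 0 l 1)).1 = (pvBuild gs 0 rem (k+1)).1 := by
        rw [show PySem.List.pyRange 0 l 1 = PySem.List.pyRange 0 (0 + ((k+1:Nat):Int)) 1 from by
          rw [zero_add, hkl]]
        rw [pvBLoop gs rem c hgs0 (k+1) 0 0 [] le_rfl (by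
          push_cast
          rw [show gs*((k:Int)+1) = gs*(k:Int)+gs from by ring]
          omega)]
        rw [show rem - 0 = rem from by omega]
        simp
      rw [hB]
      -- A side: initial array, then split the cpu range at the group boundaries
      rw [pvInit, hk, List.replicate_succ]
      rw [PySem.List.pyRange_one_append 0 (gs + e0) c (by omega) hs0c]
      rw [PySem.List.pyRange_one_cons (by omega : (0:Int) < gs + e0)]
      rw [List.foldl_append]
      simp only [List.foldl_cons]
      have hstep := pvStepA_mid gs ([] : List (List Int)) ([] : List Int)
          (List.replicate k ([] : List Int)) rem 0 (by simp; omega)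
      simp only [List.nil_append, List.length_nil, Nat.cast_zero] at hstep
      rw [hstep]
      rw [if_neg (by simp; omega)]
      have hfin := pvFinish gs hgs1 (gs + e0 - 1).toNat 1 rem 1 ([] : List (List Int)) k
          (by omega) (by omega)
          (by rw [← he0]; rcases he01 with h | h <;> rw [h] <;> push_cast <;> omega)
      simp only [List.nil_append, List.length_nil, Nat.cast_zero] at hfin
      rw [show PySem.List.pyRange (1 - 1) 1 1 = [(0:Int)] from by
        rw [show (1:Int) - 1 = 0 by omega]; exact PySem.List.pyRange_one_singleton 0] at hfin
      rw [show (1:Int) + ((gs + e0 - 1).toNat : Int) = gs + e0 from by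
        rcases he01 with h | h <;> rw [h] <;> omega] at hfin
      rw [show (1:Int) - 1 = 0 from by omega] at hfin
      rw [show (0:Int) + 1 = 1 from by omega]
      rw [hfin]
      rw [← he0]
      -- remaining k groups
      have hgrp := pvGroups gs hgs1 k ([] : List (List Int)) (PySem.List.pyRange 0 (gs + e0) 1)
          (rem - e0) (gs + e0)
          (by rcases he01 with h | h <;> rw [h] <;> omega)
          (by rcases he01 with h | h <;> rw [h] <;> push_cast <;> omega)
          (by rw [PySem.List.length_pyRange_one]; omega)
          (by intro hh
              have hrpos : 0 < rem := by rcases he01 with h | h <;> omega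
              have h1 : e0 = 1 := by rw [he0, if_pos hrpos]
              rw [PySem.List.length_pyRange_one]
              rw [h1] at hh ⊢; omega)
      simp only [List.nil_append, List.length_nil, Nat.cast_zero] at hgrp
      rw [show (gs + e0) + (gs * ((k:Nat):Int) + min (rem - e0) ((k:Nat):Int)) = c from by
        rcases he01 with h | h
        · have := her0 h; rw [h]; push_cast; omega
        · rw [h]; push_cast; omega] at hgrp
      rw [hgrp]
      -- both sides are now pvBuild shapes
      simp only [pvBuild, ← he0, zero_add]
      rcases he01 with h | h
      · have hr0 : rem = 0 := her0 h
        rw [h, hr0]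
        rw [pvBuild_nonpos k gs (gs + 0) (0 - 1) (0 - 0) (by omega) (by omega)]
      · rw [h]
    · -- gs = 0: fewer cpus than groups
      have hgsz : gs = 0 := by omega
      have hlg0 : l * gs = 0 := by rw [hgsz, mul_zero]
      have hremc : rem = c := by omega
      have hrpos : 0 < rem := by omega
      rw [hgsz]
      have hB : (List.foldl (pvStepB (PySem.List.pyRange 0 c 1) 0 rem) ([], 0)
            (PySem.List.pyRange 0 l 1)).1 = (pvBuild 0 0 rem (k+1)).1 := by
        rw [show PySem.List.pyRange 0 l 1 = PySem.List.pyRange 0 (0 + ((k+1:Nat):Int)) 1 from by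
          rw [zero_add, hkl]]
        rw [pvBLoop 0 rem c le_rfl (k+1) 0 0 [] le_rfl (by
          push_cast
          rw [zero_mul]
          omega)]
        rw [show rem - 0 = rem from by omega]
        simp
      rw [hB]
      rw [pvBuild_gs0 (k+1) 0 rem h0rem]
      rw [show min rem (((k+1:Nat)):Int) = rem from by push_cast; omega]
      -- A side
      rw [pvInit, hk, List.replicate_succ]
      rw [PySem.List.pyRange_one_cons (by omega : (0:Int) < c)]
      simp only [List.foldl_cons]
      have hstep := pvStepA_mid 0 ([] : List (List Int)) ([] : List Int)
          (List.replicate k ([] : List Int)) rem 0 (by simp; omega)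
      simp only [List.nil_append, List.length_nil, Nat.cast_zero] at hstep
      rw [hstep]
      rw [if_pos (le_refl (0:Int))]
      have hzero := pvZero (c-1).toNat ([] : List (List Int)) [0] k (rem - 1) 1
          (by simp) (by omega)
      simp only [List.nil_append, List.length_nil, Nat.cast_zero] at hzero
      rw [show (1:Int) + (((c-1).toNat : Nat) : Int) = c from by omega] at hzero
      rw [show (0:Int) + 1 = 1 from by omega]
      rw [hzero]
      rw [show (0:Int) + rem = rem from by omega]
      rw [PySem.List.pyRange_one_cons (by omega : (0:Int) < rem)]
      simp only [List.map_cons]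
      rw [show (0:Int) + 1 = 1 from by omega, hremc]
      rw [show k - (c-1).toNat = (k+1) - rem.toNat from by omega]
      simp
      omega

-- ===== VERDICT (by name: the statement is the Claim_ definition above) =====
theorem linda_distribute_ordered_spec : Claim_equal_linda_distribute_ordered := by
  intro lindas cpus _ hpre
  unfold Spec_linda_distribute_ordered
  exact pvMain lindas cpus hpre.1 hpre.2
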